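-- pv_equiv track=rewrite | github.com/austinc3030/school_archive | graduate/spring_2022/malware_analysis/objdump_walker/objdump_walker.py | determineOperandType
-- ===== SOURCE A (Python) =====
-- def determineOperandType(stroperand):
--
--     stroperandType = None
--
--     astrRegisters = ["rax", "eax", "ax", "ah ", "al", "rcx", "ecx", "cx", "ch", "cl", "rdx", "edx", "dx",
--                      "dh ", "d1", "rbx", "ebx", "bx", "bh", "bl", "rsp", "esp", "sp", "spl", "rbp", "ebp",
--                      "bp", "bpl", "rsi", "edi", "si", "sil", "rdi", "edi", "di", "dil"]
--
--     for strRegister in astrRegisters: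
--
--         if strRegister in stroperand:
--
--             stroperandType = "Register"
--             break
--
--         if not stroperandType:
--
--             stroperandType = "Memory"
--
--         stroperandType = "Memory"
--
--     return stroperandType
-- ===== SOURCE B (Python) =====
-- ASTR_REGISTERS = ("rax", "eax", "ax", "ah ", "al", "rcx", "ecx", "cx", "ch", "cl", "rdx", "edx", "dx",
--                   "dh ", "d1", "rbx", "ebx", "bx", "bh", "bl", "rsp", "esp", "sp", "spl", "rbp", "ebp",
--                   "bp", "bpl", "rsi", "edi", "si", "sil", "rdi", "edi", "di", "dil")
--
--
-- def determineOperandType(stroperand):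
--     # single left-to-right scan over the operand's positions: at each position,
--     # test whether some register name starts there
--     for i in range(len(stroperand)):
--         for strRegister in ASTR_REGISTERS:
--             if stroperand.startswith(strRegister, i):
--                 return "Register"
--     return "Memory"
-- ===== Notes on version B (the rewrite author's own statement) =====
-- stated objective: alternative
-- what changed: B scans the operand once over its positions and tests which register name starts at each position, instead of A's loop over the register list running a full substring search per register; A's always-overwritten state variable with its dead assignments disappears.
import Mathlib
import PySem

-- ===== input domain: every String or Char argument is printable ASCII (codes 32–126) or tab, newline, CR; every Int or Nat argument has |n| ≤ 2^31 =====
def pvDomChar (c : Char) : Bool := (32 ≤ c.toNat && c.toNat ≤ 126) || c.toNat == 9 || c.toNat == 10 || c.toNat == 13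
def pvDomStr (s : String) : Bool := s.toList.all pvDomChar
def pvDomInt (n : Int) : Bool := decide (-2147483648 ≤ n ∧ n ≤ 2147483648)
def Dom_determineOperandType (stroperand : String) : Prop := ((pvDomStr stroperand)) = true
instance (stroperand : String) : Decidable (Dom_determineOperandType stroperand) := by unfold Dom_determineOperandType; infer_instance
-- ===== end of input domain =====

-- B replaces A's register-list loop (one full substring search per register, with an
-- always-overwritten state variable) by a single left-to-right scan of the operand's
-- positions, testing which register name starts at each position; alternative decomposition.

-- the 36 register strings, verbatim from A (including "ah "/"dh " with spaces, "d1", duplicate "edi")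
def pvRegisters : List String :=
  ["rax", "eax", "ax", "ah ", "al", "rcx", "ecx", "cx", "ch", "cl", "rdx", "edx", "dx",
   "dh ", "d1", "rbx", "ebx", "bx", "bh", "bl", "rsp", "esp", "sp", "spl", "rbp", "ebp",
   "bp", "bpl", "rsi", "edi", "si", "sil", "rdi", "edi", "di", "dil"]

-- ===== PORT A =====
-- A's for-loop over the register list, carried state stroperandType : Option String;
-- the two dead assignments in the non-matching branch are kept literally.
def pvLoopA (stroperand : String) : List String → Option String → Option String
  | [], st => st
  | strRegister :: rest, st =>
    if PySem.Str.isIn strRegister stroperand then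
      some "Register"          -- set and break
    else
      -- if not stroperandType: stroperandType = "Memory"
      let st := if st = none then some "Memory" else st
      -- stroperandType = "Memory"
      let st := some "Memory"
      pvLoopA stroperand rest st

def determineOperandType (stroperand : String) : Option String :=
  pvLoopA stroperand pvRegisters none

-- ===== PORT B =====
-- Source B's outer loop 'for i in range(len(stroperand))' as structural recursion on the
-- suffix starting at i; 'stroperand.startswith(strRegister, i)' is startswith on that suffix.
def pvLoopB : List Char → Option String
  | [] => some "Memory"
  | c :: rest =>
    if pvRegisters.any (fun strRegister => PySem.Chars.startswith (c :: rest) strRegister.toList) then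
      some "Register"
    else
      pvLoopB rest

def determineOperandType_alt (stroperand : String) : Option String :=
  pvLoopB stroperand.toList

-- ===== PRECONDITION & SPEC =====
def Spec_determineOperandType (stroperand : String) (out : Option String) : Prop := out = determineOperandType_alt stroperand
instance (stroperand : String) (out : Option String) : Decidable (Spec_determineOperandType stroperand out) := by unfold Spec_determineOperandType; infer_instance

-- ===== CLAIM (what is proved, stated in full; the proofs are below) =====
def Claim_equal_determineOperandType : Prop := ∀ (stroperand : String), Dom_determineOperandType stroperand → Spec_determineOperandType stroperand (determineOperandType stroperand)

-- ===== LEMMAS AND PROOFS =====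

-- A's loop on a nonempty register list: "Register" iff some register is a substring, else "Memory"
theorem pvLoopA_eq (s : String) (rs : List String) (st : Option String) (h : rs ≠ []) :
    pvLoopA s rs st =
      if rs.any (fun r => PySem.Chars.isIn r.toList s.toList) then some "Register" else some "Memory" := by
  induction rs generalizing st with
  | nil => exact absurd rfl h
  | cons r rest ih =>
    simp only [pvLoopA, List.any_cons, PySem.Str.isIn_eq]
    by_cases hr : PySem.Chars.isIn r.toList s.toList = true
    · simp [hr]
    · cases rest with
      | nil => simp [hr, pvLoopA]
      | cons a t =>
        have hf : PySem.Chars.isIn r.toList s.toList = false := by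
          simpa [Bool.not_eq_true] using hr
        rw [if_neg (by simp [hf])]
        simp only [hf, Bool.false_or]
        exact ih _ (by simp)

-- B's loop: "Register" iff some register is a substring of the suffix, else "Memory"
theorem pvLoopB_eq (l : List Char) :
    pvLoopB l =
      if pvRegisters.any (fun r => PySem.Chars.isIn r.toList l) then some "Register" else some "Memory" := by
  induction l with
  | nil =>
    simp only [pvLoopB]
    rw [if_neg]
    decide
  | cons c rest ih =>
    simp only [pvLoopB]
    by_cases hs : pvRegisters.any (fun r => PySem.Chars.startswith (c :: rest) r.toList) = true
    · rw [if_pos hs, if_pos]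
      rcases List.any_eq_true.mp hs with ⟨r, hr, hsw⟩
      refine List.any_eq_true.mpr ⟨r, hr, ?_⟩
      rw [PySem.Chars.isIn_iff_infix]
      exact ((PySem.Chars.startswith_iff _ _).mp hsw).isInfix
    · rw [if_neg hs, ih]
      congr 1
      rw [eq_iff_iff]
      constructor
      · rintro hb
        rcases List.any_eq_true.mp hb with ⟨r, hr, hin⟩
        rw [PySem.Chars.isIn_iff_infix] at hin
        exact List.any_eq_true.mpr ⟨r, hr, (PySem.Chars.isIn_iff_infix _ _).mpr (hin.trans (List.suffix_cons c rest).isInfix)⟩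
      · rintro hb
        rcases List.any_eq_true.mp hb with ⟨r, hr, hin⟩
        rw [PySem.Chars.isIn_iff_infix] at hin
        rcases List.infix_cons_iff.mp hin with hp | hi
        · exact absurd (List.any_eq_true.mpr ⟨r, hr, (PySem.Chars.startswith_iff _ _).mpr hp⟩) hs
        · exact List.any_eq_true.mpr ⟨r, hr, (PySem.Chars.isIn_iff_infix _ _).mpr hi⟩

-- ===== VERDICT (by name: the statement is the Claim_ definition above) =====
theorem determineOperandType_spec : Claim_equal_determineOperandType := by
  intro s _
  unfold Spec_determineOperandType determineOperandType determineOperandType_alt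
  rw [pvLoopA_eq s pvRegisters none (by decide), pvLoopB_eq]
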